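-- pv_equiv track=rewrite | github.com/anie0521/codingtest_prep_repo | baekjoon_coding/2309.py | find_seven_people
-- ===== SOURCE A (Python) =====
-- def find_seven_people(arr):
--     total_sum = sum(arr)
--
--     remove_arr = []
--
--     res = []
--
--     for i in range(len(arr)):
--         for j in range(i+1, len(arr)):
--             if total_sum - arr[i] - arr[j] == 100:
--                 remove_arr.append(arr[i])
--                 remove_arr.append(arr[j])
--                 break
--
--     res = [arr[i] for i in range(len(arr)) if arr[i] not in remove_arr]
--
--     res.sort()
--
--     return res
-- ===== SOURCE B (Python) =====
-- def find_seven_people(arr):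
--     # One pass with a suffix-count dict: for each x, a later partner y exists
--     # iff target - x remains in the suffix; removed values are x and target - x.
--     target = sum(arr) - 100
--     remaining = {}
--     for x in arr:
--         remaining[x] = remaining.get(x, 0) + 1
--     removed = set()
--     for x in arr:
--         remaining[x] -= 1
--         if remaining.get(target - x, 0) > 0:
--             removed.add(x)
--             removed.add(target - x)
--     return sorted(y for y in arr if y not in removed)
-- ===== Notes on version B (the rewrite author's own statement) =====
-- stated objective: faster
-- what changed: Replaces the O(n^2) nested index scan with a single pass over a suffix-count hash map (the partner value is determined as target - x, so an inner scan is unnecessary), collecting removed values in a set.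
import Mathlib
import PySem

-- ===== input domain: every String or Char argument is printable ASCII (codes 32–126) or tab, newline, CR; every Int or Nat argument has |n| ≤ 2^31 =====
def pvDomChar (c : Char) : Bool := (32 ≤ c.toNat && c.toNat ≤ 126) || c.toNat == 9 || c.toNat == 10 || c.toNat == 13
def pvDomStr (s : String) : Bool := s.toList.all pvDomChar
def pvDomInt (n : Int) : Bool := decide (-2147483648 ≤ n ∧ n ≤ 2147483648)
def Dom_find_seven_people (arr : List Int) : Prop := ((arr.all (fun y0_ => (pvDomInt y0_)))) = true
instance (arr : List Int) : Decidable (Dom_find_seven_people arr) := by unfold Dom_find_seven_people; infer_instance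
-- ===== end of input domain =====

-- B replaces A's O(n^2) nested scan with one pass over a suffix-count dict plus a removed-value set.

-- ===== PORT A =====
-- inner 'for j in range(i+1, len(arr))' with break: scan the elements after position i
def pvA_inner (total x : Int) : List Int → List Int
  | [] => []
  | y :: ys => if total - x - y = 100 then [x, y] else pvA_inner total x ys

-- outer 'for i in range(len(arr))': each iteration appends the pair found for i (if any)
def pvA_outer (total : Int) : List Int → List Int
  | [] => []
  | x :: xs => pvA_inner total x xs ++ pvA_outer total xs

def find_seven_people (arr : List Int) : List Int :=
  let total_sum := arr.foldl (· + ·) 0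
  let remove_arr := pvA_outer total_sum arr
  PySem.List.sorted (arr.filter (fun v => !(remove_arr.contains v))) (fun v => v) false

-- ===== PORT B =====
def pvB_step (target : Int) (st : PySem.Dict Int Int × PySem.Set Int) (x : Int) :
    PySem.Dict Int Int × PySem.Set Int :=
  let d := st.1.insert x (st.1.getD x 0 - 1)       -- remaining[x] -= 1 (x is always a key)
  if d.getD (target - x) 0 > 0 then (d, (st.2.add x).add (target - x)) else (d, st.2)

def find_seven_people_alt (arr : List Int) : List Int :=
  let target := arr.foldl (· + ·) 0 - 100
  let remaining := arr.foldl (fun d x => d.insert x (d.getD x 0 + 1)) PySem.Dict.empty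
  let removed := (arr.foldl (pvB_step target) (remaining, PySem.Set.empty)).2
  PySem.List.sorted (arr.filter (fun y => !(PySem.Set.contains removed y))) (fun v => v) false

-- ===== PRECONDITION & SPEC =====
def Spec_find_seven_people (arr : List Int) (out : List Int) : Prop := out = find_seven_people_alt arr
instance (arr : List Int) (out : List Int) : Decidable (Spec_find_seven_people arr out) := by unfold Spec_find_seven_people; infer_instance

-- ===== CLAIM (what is proved, stated in full; the proofs are below) =====
def Claim_equal_find_seven_people : Prop := ∀ (arr : List Int), Dom_find_seven_people arr → Spec_find_seven_people arr (find_seven_people arr)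

-- ===== LEMMAS AND PROOFS =====

-- A's inner scan: any hit y satisfies y = total - 100 - x, so the pair is determined
lemma pvA_inner_eq (total x : Int) (ys : List Int) :
    pvA_inner total x ys =
      if ys.contains (total - 100 - x) then [x, total - 100 - x] else [] := by
  induction ys with
  | nil => simp [pvA_inner]
  | cons y ys ih =>
    simp only [pvA_inner, List.contains_cons]
    by_cases h : total - x - y = 100
    · have hy : y = total - 100 - x := by omega
      simp [hy]
    · have hy : total - 100 - x ≠ y := by omega
      simp [h, hy, ih]

-- B's loop invariant: with d holding the counts of the remaining suffix l,
-- the final set's members are s's members plus the values A's scan collects on l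
lemma pvB_loop_mem (total v : Int) (l : List Int) (d : PySem.Dict Int Int) (s : PySem.Set Int)
    (hd : ∀ k, d.getD k 0 = (l.count k : Int)) :
    v ∈ (l.foldl (pvB_step (total - 100)) (d, s)).2 ↔ v ∈ s ∨ v ∈ pvA_outer total l := by
  induction l generalizing d s with
  | nil => simp [pvA_outer]
  | cons x xs ih =>
    have hd' : ∀ k, (d.insert x (d.getD x 0 - 1)).getD k 0 = (xs.count k : Int) := by
      intro k
      rw [PySem.Dict.getD_insert]
      by_cases hk : k = x
      · subst hk
        have hcx := hd k
        rw [List.count_cons_self] at hcx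
        rw [if_pos rfl]
        push_cast at hcx ⊢
        omega
      · rw [if_neg hk, hd k, List.count_cons_of_ne (Ne.symm hk)]
    have hcond : ((d.insert x (d.getD x 0 - 1)).getD (total - 100 - x) 0 > 0)
        ↔ xs.contains (total - 100 - x) = true := by
      rw [hd' (total - 100 - x)]
      simp [List.count_pos_iff]
    simp only [List.foldl_cons, pvB_step]
    by_cases hc : (d.insert x (d.getD x 0 - 1)).getD (total - 100 - x) 0 > 0
    · have hx : xs.contains (total - 100 - x) = true := hcond.mp hc
      simp only [if_pos hc]
      rw [ih _ _ hd']
      simp only [pvA_outer, pvA_inner_eq, hx, if_true, List.mem_append,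
        PySem.Set.mem_add, List.mem_cons, List.not_mem_nil]
      tauto
    · have hx : xs.contains (total - 100 - x) = false := by
        rw [Bool.eq_false_iff]
        intro h
        exact hc (hcond.mpr h)
      simp only [if_neg hc]
      rw [ih _ _ hd']
      simp only [pvA_outer, pvA_inner_eq, hx, if_false, List.mem_append,
        List.not_mem_nil, Bool.false_eq_true]
      tauto

-- the first loop of B builds the multiplicity table of arr
lemma pvB_counter (arr : List Int) (k : Int) :
    (arr.foldl (fun d x => d.insert x (d.getD x 0 + 1)) PySem.Dict.empty).getD k 0
      = (arr.count k : Int) := by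
  rw [PySem.Dict.getD_foldl_insert_add_one]
  simp [PySem.Dict.getD_empty]

-- ===== VERDICT (by name: the statement is the Claim_ definition above) =====
theorem find_seven_people_spec : Claim_equal_find_seven_people := by
  intro arr _
  unfold Spec_find_seven_people find_seven_people find_seven_people_alt
  simp only []
  apply congrArg (fun l => PySem.List.sorted l (fun v => v) false)
  apply List.filter_congr
  intro v _
  have hmem : v ∈ (arr.foldl (pvB_step (arr.foldl (· + ·) 0 - 100))
      (arr.foldl (fun d x => d.insert x (d.getD x 0 + 1)) PySem.Dict.empty, PySem.Set.empty)).2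
      ↔ v ∈ pvA_outer (arr.foldl (· + ·) 0) arr := by
    rw [pvB_loop_mem (arr.foldl (· + ·) 0) v arr _ _ (pvB_counter arr)]
    simp [PySem.Set.empty]
  simp only [PySem.Set.contains]
  congr 1
  by_cases h : v ∈ pvA_outer (arr.foldl (· + ·) 0) arr
  · simp [h]
    exact hmem.mpr h
  · simp [h]
    exact fun hv => h (hmem.mp hv)
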